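-- pv_equiv track=rewrite | github.com/devitasari/intro-python | targetTerdekat.py | targetTerdekat
-- ===== SOURCE A (Python) =====
-- def targetTerdekat(arr):
--     x = []
--     o = []
--     jarak = []
--     for i in range(len(arr)):
--         if arr[i] == 'o':
--             o.append(i)
--         elif arr[i] == 'x':
--             x.append(i)
--     for i in x:
--         for j in o:
--             jarak.append(abs(i-j))
--     jarak.sort()
--     if len(jarak) == 0:
--         return 0
--     return jarak[0]
-- ===== SOURCE B (Python) =====
-- def targetTerdekat(arr):
--     last_x = None
--     last_o = None
--     best = None
--     for i, c in enumerate(arr):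
--         if c == 'x':
--             last_x = i
--             if last_o is not None:
--                 d = i - last_o
--                 if best is None or d < best:
--                     best = d
--         elif c == 'o':
--             last_o = i
--             if last_x is not None:
--                 d = i - last_x
--                 if best is None or d < best:
--                     best = d
--     return best if best is not None else 0
-- ===== Notes on version B (the rewrite author's own statement) =====
-- stated objective: alternative
-- what changed: Replaced the build-all-pair-distances-then-sort approach by a single left-to-right pass that tracks the last seen 'x' and 'o' positions and the running minimum gap (nearest opposite neighbour), using O(1) extra space instead of materialising and sorting all k_x*k_o pair distances.
import Mathlib
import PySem

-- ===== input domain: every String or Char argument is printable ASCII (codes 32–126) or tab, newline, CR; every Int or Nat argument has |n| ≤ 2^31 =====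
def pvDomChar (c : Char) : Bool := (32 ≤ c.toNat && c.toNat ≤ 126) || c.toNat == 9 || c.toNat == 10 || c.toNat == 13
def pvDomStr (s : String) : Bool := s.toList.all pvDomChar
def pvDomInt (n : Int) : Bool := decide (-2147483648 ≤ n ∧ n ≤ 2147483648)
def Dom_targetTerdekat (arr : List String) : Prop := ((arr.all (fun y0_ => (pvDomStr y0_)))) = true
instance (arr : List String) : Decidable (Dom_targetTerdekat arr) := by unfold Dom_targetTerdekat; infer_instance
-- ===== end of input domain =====

-- B replaces A's build-all-pair-distances-then-sort by a single pass that tracks the last seen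
-- 'x'/'o' position and the running minimum gap, in O(1) extra space (objective: alternative).


-- ===== PORT A =====
def targetTerdekat (arr : List String) : Int :=
  -- loop 1: for i in range(len(arr)): classify index i into the o / x position lists
  let xo := (PySem.List.pyRange 0 (arr.length : Int) 1).foldl
    (fun (st : List Int × List Int) i =>
      if PySem.List.pyGetD arr i "" = "o" then (st.1, st.2 ++ [i])
      else if PySem.List.pyGetD arr i "" = "x" then (st.1 ++ [i], st.2)
      else st) ([], [])
  -- loop 2: for i in x: for j in o: jarak.append(abs(i-j))
  let jarak := xo.1.foldl (fun acc i => xo.2.foldl (fun acc2 j => acc2 ++ [|i - j|]) acc) []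
  let s := PySem.List.sorted jarak (fun y => y) false
  if s.length = 0 then 0 else PySem.List.pyGetD s 0 0

-- ===== PORT B =====
-- one step of B's loop body; state = (last_x, last_o, best)
def stepB (st : Option Int × Option Int × Option Int) (p : Int × String) :
    Option Int × Option Int × Option Int :=
  if p.2 = "x" then
    match st.2.1 with
    | some j =>
        let d := p.1 - j
        (some p.1, st.2.1,
          match st.2.2 with
          | none => some d
          | some b => if d < b then some d else some b)
    | none => (some p.1, st.2.1, st.2.2)
  else if p.2 = "o" then
    match st.1 with
    | some j =>
        let d := p.1 - j
        (st.1, some p.1,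
          match st.2.2 with
          | none => some d
          | some b => if d < b then some d else some b)
    | none => (st.1, some p.1, st.2.2)
  else st

def targetTerdekat_alt (arr : List String) : Int :=
  let st := (PySem.List.enumerate arr 0).foldl stepB (none, none, none)
  (st.2.2).getD 0

-- ===== PRECONDITION & SPEC =====
def Spec_targetTerdekat (arr : List String) (out : Int) : Prop := out = targetTerdekat_alt arr
instance (arr : List String) (out : Int) : Decidable (Spec_targetTerdekat arr out) := by unfold Spec_targetTerdekat; infer_instance

-- ===== CLAIM (what is proved, stated in full; the proofs are below) =====
def Claim_equal_targetTerdekat : Prop := ∀ (arr : List String), Dom_targetTerdekat arr → Spec_targetTerdekat arr (targetTerdekat arr)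

-- ===== LEMMAS AND PROOFS =====

-- positions of the marker c in arr
def posOf (arr : List String) (c : String) : List Int :=
  ((PySem.List.enumerate arr 0).filter (fun p => p.2 == c)).map (·.1)

-- the multiset of pair distances A builds
def pairs (arr : List String) : List Int :=
  (posOf arr "x").flatMap (fun i => (posOf arr "o").map (fun j => |i - j|))

-- A's first loop computes the two position lists
-- A's first loop
theorem loopA (arr : List String) :
    (PySem.List.pyRange 0 (arr.length : Int) 1).foldl
      (fun (st : List Int × List Int) i =>
        if PySem.List.pyGetD arr i "" = "o" then (st.1, st.2 ++ [i])
        else if PySem.List.pyGetD arr i "" = "x" then (st.1 ++ [i], st.2)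
        else st) ([], [])
    = (posOf arr "x", posOf arr "o") := by
  have he := PySem.List.enumerate_eq_map_pyRange arr ""
  have gen : ∀ (l : List (Int × String)) (x0 o0 : List Int),
      l.foldl (fun (st : List Int × List Int) p =>
        if p.2 = "o" then (st.1, st.2 ++ [p.1])
        else if p.2 = "x" then (st.1 ++ [p.1], st.2)
        else st) (x0, o0)
      = (x0 ++ ((l.filter (fun p => p.2 == "x")).map (·.1)),
         o0 ++ ((l.filter (fun p => p.2 == "o")).map (·.1))) := by
    intro l
    induction l with
    | nil => simp
    | cons p t ih =>
      intro x0 o0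
      by_cases ho : p.2 = "o"
      · simp [List.foldl_cons, ho, ih, List.filter_cons]
      · by_cases hx : p.2 = "x"
        · simp [List.foldl_cons, ho, hx, ih, List.filter_cons]
        · simp [List.foldl_cons, ho, hx, ih, List.filter_cons]
  have := gen (PySem.List.enumerate arr 0) [] []
  rw [he, List.foldl_map] at this
  simp only [posOf]
  rw [he]
  simp only [PySem.List.len_eq] at this ⊢
  simpa using this


-- min? with the identity key is characterised by membership and being a lower bound
theorem min_id_char (l : List Int) (m : Int) :
    PySem.List.min? l (fun y => y) = some m ↔ m ∈ l ∧ ∀ y ∈ l, m ≤ y := by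
  constructor
  · intro h
    exact ⟨PySem.List.min?_mem h, fun y hy => PySem.List.min?_isMin h y hy⟩
  · rintro ⟨hm, hmin⟩
    have hne : l ≠ [] := by intro h; subst h; simp at hm
    obtain ⟨μ, hμ⟩ : ∃ μ, PySem.List.min? l (fun y => y) = some μ := by
      cases h : PySem.List.min? l (fun y => y) with
      | none => exact absurd ((PySem.List.min?_eq_none_iff _ _).1 h) hne
      | some μ => exact ⟨μ, rfl⟩
    have h1 : μ ∈ l := PySem.List.min?_mem hμ
    have h2 : (μ : Int) ≤ m := PySem.List.min?_isMin hμ m hm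
    have h3 : m ≤ μ := hmin μ h1
    rw [hμ]; congr 1; omega
theorem mem_pairs (arr : List String) (e : Int) :
    e ∈ pairs arr ↔ ∃ i ∈ posOf arr "x", ∃ j ∈ posOf arr "o", e = |i - j| := by
  simp [pairs, List.mem_flatMap, List.mem_map, eq_comm]
theorem posOf_lt (arr : List String) (c : String) (i : Int) (hi : i ∈ posOf arr c) :
    i < (arr.length : Int) := by
  simp only [posOf, List.mem_map, List.mem_filter] at hi
  obtain ⟨p, ⟨hp, _⟩, hfst⟩ := hi
  rw [PySem.List.mem_enumerate_iff] at hp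
  obtain ⟨k, hk, rfl⟩ := hp
  simp at hfst ⊢
  omega
theorem posOf_pairwise (arr : List String) (c : String) :
    (posOf arr c).Pairwise (· < ·) := by
  refine List.Pairwise.map _ (fun a b h => h) ?_
  exact List.Pairwise.filter _ (PySem.List.pairwise_lt_enumerate arr 0)
theorem le_getLast_of_pairwise_lt {l : List Int} (h : l.Pairwise (· < ·))
    {j : Int} (hj : l.getLast? = some j) {i : Int} (hi : i ∈ l) : i ≤ j := by
  induction l with
  | nil => simp at hi
  | cons a t ih =>
    cases t with
    | nil => simp_all
    | cons b u =>
      rw [List.getLast?_cons_cons] at hj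
      rcases List.mem_cons.1 hi with rfl | hi'
      · have hjmem : j ∈ b :: u := List.mem_of_getLast? hj
        have := (List.pairwise_cons.1 h).1 j hjmem
        omega
      · exact ih (List.pairwise_cons.1 h).2 hj hi'
theorem posOf_append (arr : List String) (a c : String) :
    posOf (arr ++ [a]) c = posOf arr c ++ (if a == c then [(arr.length : Int)] else []) := by
  simp only [posOf, PySem.List.enumerate_append, List.filter_append, List.map_append]
  congr 1
  by_cases h : a == c <;> simp [PySem.List.enumerate, h]
-- the effect on the minimum of adding one new position n paired against the list L
theorem min_snoc (P P' L : List Int) (n : Int)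
    (hL : ∀ j ∈ L, j < n) (hLpw : L.Pairwise (· < ·))
    (hmem : ∀ e, e ∈ P' ↔ e ∈ P ∨ ∃ j ∈ L, e = |n - j|) :
    PySem.List.min? P' (fun y => y) =
      match L.getLast?, PySem.List.min? P (fun y => y) with
      | none, M => M
      | some j0, none => some (n - j0)
      | some j0, some m => some (if n - j0 < m then n - j0 else m) := by
  rcases hL0 : L.getLast? with _ | j0
  · have hLnil : L = [] := List.getLast?_eq_none_iff.1 hL0
    subst hLnil
    rcases hM : PySem.List.min? P (fun y => y) with _ | m
    · have hPnil : P = [] := (PySem.List.min?_eq_none_iff _ _).1 hM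
      subst hPnil
      simp only []
      refine (PySem.List.min?_eq_none_iff _ _).2 ?_
      rw [List.eq_nil_iff_forall_not_mem]
      intro e he
      rcases (hmem e).1 he with h | ⟨j, hj, _⟩
      · simp at h
      · simp at hj
    · obtain ⟨hmP, hbd⟩ := (min_id_char P m).1 hM
      refine (min_id_char _ _).2 ⟨(hmem m).2 (Or.inl hmP), ?_⟩
      intro y hy
      rcases (hmem y).1 hy with h | ⟨j, hj, _⟩
      · exact hbd y h
      · simp at hj
  · have hj0 : j0 ∈ L := List.mem_of_getLast? hL0
    have hj0n : j0 < n := hL j0 hj0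
    have hmax : ∀ j ∈ L, j ≤ j0 := fun j hj => le_getLast_of_pairwise_lt hLpw hL0 hj
    rcases hM : PySem.List.min? P (fun y => y) with _ | m
    · have hPnil : P = [] := (PySem.List.min?_eq_none_iff _ _).1 hM
      subst hPnil
      refine (min_id_char _ _).2 ⟨(hmem _).2 (Or.inr ⟨j0, hj0, (abs_of_nonneg (by omega)).symm⟩), ?_⟩
      intro y hy
      rcases (hmem y).1 hy with h | ⟨j, hj, rfl⟩
      · simp at h
      · rw [abs_of_nonneg (by have := hL j hj; omega)]
        have := hmax j hj; omega
    · obtain ⟨hmP, hbd⟩ := (min_id_char P m).1 hM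
      refine (min_id_char _ _).2 ⟨?_, ?_⟩
      · by_cases hlt : n - j0 < m
        · simp only [if_pos hlt]
          exact (hmem _).2 (Or.inr ⟨j0, hj0, (abs_of_nonneg (by omega)).symm⟩)
        · simp only [if_neg hlt]
          exact (hmem m).2 (Or.inl hmP)
      · intro y hy
        rcases (hmem y).1 hy with h | ⟨j, hj, rfl⟩
        · have := hbd y h
          by_cases hlt : n - j0 < m <;> simp [hlt] <;> omega
        · rw [abs_of_nonneg (by have := hL j hj; omega)]
          have h1 := hmax j hj
          by_cases hlt : n - j0 < m <;> simp [hlt] <;> omega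

theorem foldB_spec (arr : List String) :
    (PySem.List.enumerate arr 0).foldl stepB (none, none, none)
    = ((posOf arr "x").getLast?, (posOf arr "o").getLast?,
       PySem.List.min? (pairs arr) (fun y => y)) := by
  induction arr using List.reverseRecOn with
  | nil => simp [PySem.List.enumerate, posOf, pairs, PySem.List.min?]
  | append_singleton arr a ih =>
    have hen : PySem.List.enumerate (arr ++ [a]) 0
        = PySem.List.enumerate arr 0 ++ [((arr.length : Int), a)] := by
      rw [PySem.List.enumerate_append]; norm_num [PySem.List.enumerate]
    rw [hen, List.foldl_append, ih]
    simp only [List.foldl_cons, List.foldl_nil]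
    by_cases hx : a = "x"
    · subst hx
      have hpx : posOf (arr ++ ["x"]) "x" = posOf arr "x" ++ [(arr.length : Int)] := by
        rw [posOf_append]; simp
      have hpo : posOf (arr ++ ["x"]) "o" = posOf arr "o" := by
        rw [posOf_append]; simp
      have hmem : ∀ e, e ∈ pairs (arr ++ ["x"]) ↔
          e ∈ pairs arr ∨ ∃ j ∈ posOf arr "o", e = |(arr.length : Int) - j| := by
        intro e
        rw [mem_pairs, mem_pairs, hpx, hpo]
        constructor
        · rintro ⟨i, hi, j, hj, rfl⟩
          rcases List.mem_append.1 hi with hi | hi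
          · exact Or.inl ⟨i, hi, j, hj, rfl⟩
          · simp at hi; subst hi; exact Or.inr ⟨j, hj, rfl⟩
        · rintro (⟨i, hi, j, hj, rfl⟩ | ⟨j, hj, rfl⟩)
          · exact ⟨i, List.mem_append.2 (Or.inl hi), j, hj, rfl⟩
          · exact ⟨(arr.length : Int), List.mem_append.2 (Or.inr (by simp)), j, hj, rfl⟩
      have hmin := min_snoc (pairs arr) (pairs (arr ++ ["x"])) (posOf arr "o")
        ((arr.length : Int)) (fun j hj => posOf_lt arr "o" j hj)
        (posOf_pairwise arr "o") hmem
      rw [hpx, hpo, hmin, List.getLast?_concat]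
      rcases hLo : (posOf arr "o").getLast? with _ | j0 <;>
        rcases hM : PySem.List.min? (pairs arr) (fun y => y) with _ | m <;>
          simp [stepB] <;> split_ifs <;> rfl
    · by_cases ho : a = "o"
      · subst ho
        have hpx : posOf (arr ++ ["o"]) "x" = posOf arr "x" := by
          rw [posOf_append]; simp
        have hpo : posOf (arr ++ ["o"]) "o" = posOf arr "o" ++ [(arr.length : Int)] := by
          rw [posOf_append]; simp
        have hmem : ∀ e, e ∈ pairs (arr ++ ["o"]) ↔
            e ∈ pairs arr ∨ ∃ i ∈ posOf arr "x", e = |(arr.length : Int) - i| := by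
          intro e
          rw [mem_pairs, mem_pairs, hpx, hpo]
          constructor
          · rintro ⟨i, hi, j, hj, rfl⟩
            rcases List.mem_append.1 hj with hj | hj
            · exact Or.inl ⟨i, hi, j, hj, rfl⟩
            · simp at hj; subst hj
              exact Or.inr ⟨i, hi, by rw [abs_sub_comm]⟩
          · rintro (⟨i, hi, j, hj, rfl⟩ | ⟨i, hi, rfl⟩)
            · exact ⟨i, hi, j, List.mem_append.2 (Or.inl hj), rfl⟩
            · exact ⟨i, hi, (arr.length : Int), List.mem_append.2 (Or.inr (by simp)),
                abs_sub_comm _ _⟩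
        have hmin := min_snoc (pairs arr) (pairs (arr ++ ["o"])) (posOf arr "x")
          ((arr.length : Int)) (fun i hi => posOf_lt arr "x" i hi)
          (posOf_pairwise arr "x") hmem
        rw [hpx, hpo, hmin, List.getLast?_concat]
        rcases hLx : (posOf arr "x").getLast? with _ | i0 <;>
          rcases hM : PySem.List.min? (pairs arr) (fun y => y) with _ | m <;>
            simp [stepB] <;> split_ifs <;> rfl
      · have hpx : posOf (arr ++ [a]) "x" = posOf arr "x" := by
          rw [posOf_append]; simp [hx]
        have hpo : posOf (arr ++ [a]) "o" = posOf arr "o" := by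
          rw [posOf_append]; simp [ho]
        have hpr : pairs (arr ++ [a]) = pairs arr := by
          simp [pairs, hpx, hpo]
        rw [hpx, hpo, hpr]
        simp [stepB, hx, ho]

-- A's result is the minimum pair distance (0 when there are no pairs)
theorem A_eq_min (arr : List String) :
    targetTerdekat arr = (PySem.List.min? (pairs arr) (fun y => y)).getD 0 := by
  unfold targetTerdekat
  rw [loopA arr]
  have hjarak : (posOf arr "x").foldl
      (fun acc i => (posOf arr "o").foldl (fun acc2 j => acc2 ++ [|i - j|]) acc) []
      = pairs arr := by
    have h1 : ∀ (acc : List Int) (i : Int),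
        (posOf arr "o").foldl (fun acc2 j => acc2 ++ [|i - j|]) acc
        = acc ++ (posOf arr "o").map (fun j => |i - j|) :=
      fun acc i => PySem.List.foldl_append_singleton_eq_map _ _ _
    simp only [h1]
    simpa [pairs] using
      PySem.List.foldl_append_eq_flatMap
        (fun i => (posOf arr "o").map (fun j => |i - j|)) (posOf arr "x") []
  simp only [hjarak]
  rcases hs : PySem.List.sorted (pairs arr) (fun y => y) false with _ | ⟨m, t⟩
  · have hnil : pairs arr = [] := (PySem.List.sorted_eq_nil_iff _ _ _).1 hs
    simp [hs, hnil, PySem.List.min?]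
  · have hlen : (m :: t).length ≠ 0 := by simp
    have hmem : m ∈ pairs arr := by
      rw [← PySem.List.mem_sorted (pairs arr) (fun y => y) false, hs]; simp
    have hmin : ∀ y ∈ pairs arr, m ≤ y := fun y hy =>
      PySem.List.key_head_sorted_le (pairs arr) (fun y => y) hs y hy
    rw [(min_id_char _ _).2 ⟨hmem, hmin⟩]
    simp [hs, PySem.List.pyGetD, PySem.List.pyGet?, PySem.List.pyIdx?]

-- ===== VERDICT (by name: the statement is the Claim_ definition above) =====
theorem targetTerdekat_spec : Claim_equal_targetTerdekat := by
  intro arr _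
  show targetTerdekat arr = targetTerdekat_alt arr
  rw [A_eq_min, targetTerdekat_alt, foldB_spec]
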